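-- pv_equiv track=rewrite | github.com/antodiazcano/wordle | wordle.py | _calculate_vector
-- ===== SOURCE A (Python) =====
-- from typing import List
--
-- N_LETTERS = 5
--
-- GREY = 0
--
-- YELLOW = 1
--
-- GREEN = 2
--
-- def _calculate_vector(guess: str, real_word: str) -> List[int]:
--
--     """
--     Calculates the response vector.
--
--     Parameters
--     ----------
--     guess      : Introduced word.
--     real_word  : Real word.
--
--     Returns
--     -------
--     v          : Response vector.
--     """
--
--     v = [GREY for _ in range(N_LETTERS)]
--     count = [real_word.count(letter) for letter in real_word]
--
--     for i, letter in enumerate(guess):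
--         if letter == real_word[i]:
--             v[i] = GREEN
--             # Substract everywhere it corresponds (a letter can appear
--             # more than once in the real word)
--             for j, l in enumerate(real_word):
--                 if letter == l:
--                     count[j] -= 1
--
--     for i, letter in enumerate(guess):
--
--         if v[i] != GREEN and letter in real_word:
--
--             # Does not mind if there is more than one index, so this is ok
--             idx = real_word.index(letter)
--
--             if count[idx] > 0:
--                 v[i] = YELLOW
--                 # As in the previous "for" loop
--                 for j, l in enumerate(real_word):
--                     if letter == l:
--                         count[j] -= 1
--
--     return v
-- ===== SOURCE B (Python) =====
-- from typing import List
--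
-- N_LETTERS = 5
--
-- GREY = 0
--
-- YELLOW = 1
--
-- GREEN = 2
--
-- def _calculate_vector(guess: str, real_word: str) -> List[int]:
--     """Single pass, stateless: each position's colour is a closed-form formula
--     (rank among non-green occurrences of the letter vs. its availability),
--     instead of A's two passes over a mutated per-position count list."""
--     v = [GREY] * N_LETTERS
--     for i, letter in enumerate(guess):
--         if letter == real_word[i]:
--             v[i] = GREEN
--         else:
--             avail = real_word.count(letter) - sum(
--                 1 for j in range(len(guess))
--                 if guess[j] == letter and guess[j] == real_word[j]
--             )
--             rank = sum(
--                 1 for j in range(i)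
--                 if guess[j] == letter and guess[j] != real_word[j]
--             )
--             if rank < avail:
--                 v[i] = YELLOW
--     return v
-- ===== Notes on version B (the rewrite author's own statement) =====
-- stated objective: alternative
-- what changed: Replaces A's two staged passes over a mutated per-position count list (inner decrement loops and a real_word.index scan) by a single stateless pass: each position's colour is computed by a closed-form formula (rank of the position among the non-green occurrences of its letter vs. that letter's availability), no counts are ever mutated.
import Mathlib
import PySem

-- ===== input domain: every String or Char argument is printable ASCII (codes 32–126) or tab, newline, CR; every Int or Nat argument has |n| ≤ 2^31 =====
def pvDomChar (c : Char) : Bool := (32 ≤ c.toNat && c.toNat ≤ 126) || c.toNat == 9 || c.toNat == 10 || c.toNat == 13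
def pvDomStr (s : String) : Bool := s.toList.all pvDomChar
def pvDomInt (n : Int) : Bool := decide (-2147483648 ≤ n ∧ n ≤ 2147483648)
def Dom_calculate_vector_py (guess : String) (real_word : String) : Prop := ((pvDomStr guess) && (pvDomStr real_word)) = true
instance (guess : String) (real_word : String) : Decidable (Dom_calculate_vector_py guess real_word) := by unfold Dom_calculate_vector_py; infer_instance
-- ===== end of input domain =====

-- B replaces A's two stateful passes over a mutated per-position count list by a
-- single stateless pass computing each colour from a closed-form counting formula.

-- ===== PORT A =====
-- first pass: 'if letter == real_word[i]: v[i]=GREEN; for j,l in enumerate(real_word): if letter==l: count[j]-=1'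
-- (the inner j-loop is ported positionally as a zipWith over real_word and count)
def stepA1 (r : List Char) (st : List Int × List Int) (p : Int × Char) : List Int × List Int :=
  if p.2 = PySem.List.pyGetD r p.1 ' ' then
    (PySem.List.pySetD st.1 p.1 2,
     List.zipWith (fun l c => if p.2 = l then c - 1 else c) r st.2)
  else st

-- second pass: 'if v[i] != GREEN and letter in real_word: idx = real_word.index(letter); if count[idx] > 0: …'
def stepA2 (r : List Char) (st : List Int × List Int) (p : Int × Char) : List Int × List Int :=
  if PySem.List.pyGetD st.1 p.1 0 ≠ 2 ∧ p.2 ∈ r then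
    if PySem.List.pyGetD st.2 (((PySem.List.index? r p.2).getD 0 : Nat) : Int) 0 > 0 then
      (PySem.List.pySetD st.1 p.1 1,
       List.zipWith (fun l c => if p.2 = l then c - 1 else c) r st.2)
    else st
  else st

def calculate_vector_py (guess : String) (real_word : String) : List Int :=
  let g := guess.toList
  let r := real_word.toList
  -- v = [GREY for _ in range(N_LETTERS)]
  let v : List Int := List.replicate 5 0
  -- count = [real_word.count(letter) for letter in real_word]  (str.count of one char = char count: exact)
  let count : List Int := r.map (fun c => (r.count c : Int))
  let st1 := (PySem.List.enumerate g 0).foldl (stepA1 r) (v, count)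
  let st2 := (PySem.List.enumerate g 0).foldl (stepA2 r) st1
  st2.1

-- ===== PORT B =====
-- 'guess[j] == letter and guess[j] == real_word[j]'  (a green occurrence of letter at j)
def gpred (g r : List Char) (letter : Char) (j : Int) : Bool :=
  (PySem.List.pyGetD g j ' ' == letter) && (PySem.List.pyGetD g j ' ' == PySem.List.pyGetD r j ' ')

-- 'guess[j] == letter and guess[j] != real_word[j]'  (a non-green occurrence of letter at j)
def ypred (g r : List Char) (letter : Char) (j : Int) : Bool :=
  (PySem.List.pyGetD g j ' ' == letter) && !(PySem.List.pyGetD g j ' ' == PySem.List.pyGetD r j ' ')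

-- 'avail = real_word.count(letter) - sum(1 for j in range(len(guess)) if …)'
def availB (g r : List Char) (letter : Char) : Int :=
  (r.count letter : Int) - ((PySem.List.pyRange 0 (g.length : Int) 1).countP (gpred g r letter) : Int)

-- 'rank = sum(1 for j in range(i) if …)'
def rankB (g r : List Char) (i : Int) (letter : Char) : Int :=
  ((PySem.List.pyRange 0 i 1).countP (ypred g r letter) : Int)

-- loop body: green directly, else yellow iff rank < avail
def stepB (g r : List Char) (v : List Int) (p : Int × Char) : List Int :=
  if p.2 = PySem.List.pyGetD r p.1 ' ' then PySem.List.pySetD v p.1 2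
  else if rankB g r p.1 p.2 < availB g r p.2 then PySem.List.pySetD v p.1 1
  else v

def calculate_vector_py_alt (guess : String) (real_word : String) : List Int :=
  let g := guess.toList
  let r := real_word.toList
  (PySem.List.enumerate g 0).foldl (stepB g r) (List.replicate 5 0)

-- ===== PRECONDITION & SPEC =====
-- Pre_ excludes exactly the inputs where A raises IndexError: guess longer than real_word
-- (real_word[i] in the first pass) or longer than N_LETTERS = 5 (the v[i] read in the second pass).
def Pre_calculate_vector_py (guess : String) (real_word : String) : Prop :=
  guess.toList.length ≤ real_word.toList.length ∧ guess.toList.length ≤ 5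
instance (guess : String) (real_word : String) : Decidable (Pre_calculate_vector_py guess real_word) := by
  unfold Pre_calculate_vector_py; infer_instance

def pvWitness_calculate_vector_py : String × String := ("crane", "cocoa")

def Spec_calculate_vector_py (guess : String) (real_word : String) (out : List Int) : Prop :=
  out = calculate_vector_py_alt guess real_word
instance (guess : String) (real_word : String) (out : List Int) : Decidable (Spec_calculate_vector_py guess real_word out) := by
  unfold Spec_calculate_vector_py; infer_instance

-- ===== CLAIM (what is proved, stated in full; the proofs are below) =====
def Claim_equal_calculate_vector_py : Prop := ∀ (guess : String) (real_word : String), Dom_calculate_vector_py guess real_word → Pre_calculate_vector_py guess real_word → Spec_calculate_vector_py guess real_word (calculate_vector_py guess real_word)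

-- ===== LEMMAS AND PROOFS =====

-- proof-side abbreviations: green/non-green occurrence counts below an index, and the
-- availability function A's count list realizes
def greensTo (g r : List Char) (t : Nat) (c : Char) : Int :=
  ((List.range t).countP (fun j : Nat => gpred g r c (j : Int)) : Int)
def rankTo (g r : List Char) (t : Nat) (c : Char) : Int :=
  ((List.range t).countP (fun j : Nat => ypred g r c (j : Int)) : Int)
def f1 (g r : List Char) (t : Nat) (c : Char) : Int := (r.count c : Int) - greensTo g r t c
def availF (g r : List Char) (c : Char) : Int := f1 g r g.length c
def f2 (g r : List Char) (t : Nat) (c : Char) : Int :=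
  availF g r c - min (max (availF g r c) 0) (rankTo g r t c)

-- v-only shadows of A's two loop bodies
def stepG (r : List Char) (v : List Int) (p : Int × Char) : List Int :=
  if p.2 = PySem.List.pyGetD r p.1 ' ' then PySem.List.pySetD v p.1 2 else v
def stepY (g r : List Char) (v : List Int) (p : Int × Char) : List Int :=
  if PySem.List.pyGetD v p.1 0 ≠ 2 ∧ rankB g r p.1 p.2 < availB g r p.2 then
    PySem.List.pySetD v p.1 1 else v

theorem pyGetD_set_ne (v : List Int) (tN j : Nat) (x d : Int) (hne : j ≠ tN) :
    PySem.List.pyGetD (PySem.List.pySetD v (tN : Int) x) (j : Int) d = PySem.List.pyGetD v (j : Int) d := by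
  rw [PySem.List.pySetD_natCast, PySem.List.pyGetD_natCast, PySem.List.pyGetD_natCast]
  simp [List.getD, List.getElem?_set_ne (by omega : tN ≠ j)]

theorem pyGetD_set_self (v : List Int) (tN : Nat) (x d : Int) (h : tN < v.length) :
    PySem.List.pyGetD (PySem.List.pySetD v (tN : Int) x) (tN : Int) d = x := by
  rw [PySem.List.pySetD_natCast, PySem.List.pyGetD_natCast]
  simp [List.getD, h]

theorem zipWith_dec_map (r : List Char) (f : Char → Int) (c0 : Char) :
    List.zipWith (fun l c => if c0 = l then c - 1 else c) r (r.map f)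
      = r.map (fun x => if c0 = x then f x - 1 else f x) := by
  induction r with
  | nil => rfl
  | cons a t ih => simp [ih]

theorem bridge_avail (g r : List Char) (c : Char) : availB g r c = availF g r c := by
  unfold availB availF f1 greensTo
  rw [PySem.List.pyRange_one]
  simp [List.countP_map, Function.comp_def]

theorem bridge_rank (g r : List Char) (t : Nat) (c : Char) :
    rankB g r (t : Int) c = rankTo g r t c := by
  unfold rankB rankTo
  rw [PySem.List.pyRange_one]
  simp [List.countP_map, Function.comp_def]

theorem greensTo_succ (g r : List Char) (t : Nat) (c : Char) :
    greensTo g r (t + 1) c = greensTo g r t c + (if gpred g r c (t : Int) then 1 else 0) := by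
  unfold greensTo
  rw [List.range_succ, List.countP_append]
  simp only [List.countP_cons, List.countP_nil]
  split <;> simp

theorem rankTo_succ (g r : List Char) (t : Nat) (c : Char) :
    rankTo g r (t + 1) c = rankTo g r t c + (if ypred g r c (t : Int) then 1 else 0) := by
  unfold rankTo
  rw [List.range_succ, List.countP_append]
  simp only [List.countP_cons, List.countP_nil]
  split <;> simp

theorem greensTo_nonneg (g r : List Char) (t : Nat) (c : Char) : 0 ≤ greensTo g r t c := by
  exact Int.natCast_nonneg _

theorem rankTo_nonneg (g r : List Char) (t : Nat) (c : Char) : 0 ≤ rankTo g r t c := by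
  exact Int.natCast_nonneg _

theorem mem_of_availF_pos (g r : List Char) (c : Char) (h : 0 < availF g r c) : c ∈ r := by
  have hg := greensTo_nonneg g r g.length c
  unfold availF f1 at h
  have : 0 < (r.count c : Int) := by omega
  have : 0 < r.count c := by exact_mod_cast this
  exact List.count_pos_iff.mp this

-- A's count[real_word.index(letter)] on a list of shape r.map f is f letter
theorem idx_access (r : List Char) (f : Char → Int) (a : Char) (hm : a ∈ r) :
    PySem.List.pyGetD (r.map f) (((PySem.List.index? r a).getD 0 : Nat) : Int) 0 = f a := by
  have hidx : ∃ k0 : Nat, PySem.List.index? r a = some k0 := by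
    have := (PySem.List.index?_isSome_iff (xs := r) (v := a)).mpr hm
    exact Option.isSome_iff_exists.mp this
  obtain ⟨k0, hk0⟩ := hidx
  obtain ⟨hk0lt, hk0eq, -⟩ := PySem.List.getElem_of_index?_eq_some hk0
  rw [hk0]
  simp only [Option.getD_some, PySem.List.pyGetD_natCast]
  rw [List.getD_eq_getElem _ _ (by simpa using hk0lt)]
  simp [hk0eq]

-- SIMULATION OF PASS 1: the count list stays of shape r.map (f1 _), the v-component
-- evolves by the v-only shadow stepG
theorem A1sim (g r : List Char) : ∀ (gs : List Char) (t : Nat) (v : List Int),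
    g.drop t = gs →
    List.foldl (stepA1 r) (v, r.map (f1 g r t)) (PySem.List.enumerate gs (t : Int))
      = (List.foldl (stepG r) v (PySem.List.enumerate gs (t : Int)), r.map (f1 g r (t + gs.length))) := by
  intro gs
  induction gs with
  | nil => intro t v _; simp [PySem.List.enumerate_nil]
  | cons a tl ih =>
    intro t v h
    have ht : t < g.length := by
      have hlen := congrArg List.length h
      simp [List.length_drop] at hlen
      omega
    have hsplit : a :: tl = g[t] :: g.drop (t + 1) := by
      rw [← h]; exact List.drop_eq_getElem_cons ht
    have ha : a = g[t] := by injection hsplit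
    have htl : g.drop (t + 1) = tl := by injection hsplit with _ h2; exact h2.symm
    have hga : PySem.List.pyGetD g (t : Int) ' ' = a := by
      rw [PySem.List.pyGetD_natCast, List.getD_eq_getElem _ _ ht]; exact ha.symm
    have hcast : (t : Int) + 1 = ((t + 1 : Nat) : Int) := by push_cast; ring
    have hlen1 : t + (a :: tl).length = (t + 1) + tl.length := by simp; omega
    rw [PySem.List.enumerate_cons]
    simp only [List.foldl_cons]
    by_cases hg : a = PySem.List.pyGetD r (t : Int) ' '
    · have hstep : stepA1 r (v, r.map (f1 g r t)) ((t : Int), a)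
          = (PySem.List.pySetD v (t : Int) 2, r.map (f1 g r (t + 1))) := by
        unfold stepA1
        rw [if_pos hg]
        simp only [zipWith_dec_map]
        congr 1
        refine List.map_congr_left fun c _ => ?_
        unfold f1
        rw [greensTo_succ]
        simp only [gpred, hga, ← hg, BEq.rfl, Bool.and_true, beq_iff_eq]
        split_ifs <;> omega
      have hstepG : stepG r v ((t : Int), a) = PySem.List.pySetD v (t : Int) 2 := by
        unfold stepG; rw [if_pos hg]
      rw [hstep, hstepG, hcast, hlen1, ih (t + 1) _ htl]
    · have hstep : stepA1 r (v, r.map (f1 g r t)) ((t : Int), a)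
          = (v, r.map (f1 g r (t + 1))) := by
        unfold stepA1
        rw [if_neg hg]
        congr 1
        refine List.map_congr_left fun c _ => ?_
        unfold f1
        rw [greensTo_succ]
        have : gpred g r c (t : Int) = false := by
          simp only [gpred, hga]
          simp only [Bool.and_eq_false_iff, beq_eq_false_iff_ne, ne_eq]
          exact Or.inr hg
        simp [this]
      have hstepG : stepG r v ((t : Int), a) = v := by
        unfold stepG; rw [if_neg hg]
      rw [hstep, hstepG, hcast, hlen1, ih (t + 1) _ htl]

-- characterization of the green fold: index j holds 2 iff j is a green position ≥ t
theorem Gchar (g r : List Char) (h5 : g.length ≤ 5) : ∀ (gs : List Char) (t : Nat) (v : List Int),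
    g.drop t = gs → v.length = 5 → ∀ (j : Nat),
    PySem.List.pyGetD (List.foldl (stepG r) v (PySem.List.enumerate gs (t : Int))) (j : Int) 0
      = if t ≤ j ∧ j < g.length ∧ PySem.List.pyGetD g (j : Int) ' ' = PySem.List.pyGetD r (j : Int) ' '
        then 2 else PySem.List.pyGetD v (j : Int) 0 := by
  intro gs
  induction gs with
  | nil =>
    intro t v h _ j
    have hle : g.length ≤ t := by
      have hlen2 := congrArg List.length h; simp [List.length_drop] at hlen2; omega
    rw [PySem.List.enumerate_nil]
    simp only [List.foldl_nil]
    rw [if_neg (by rintro ⟨h1, h2, -⟩; omega)]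
  | cons a tl ih =>
    intro t v h hlen j
    have ht : t < g.length := by
      have hlen2 := congrArg List.length h; simp [List.length_drop] at hlen2; omega
    have hsplit : a :: tl = g[t] :: g.drop (t + 1) := by
      rw [← h]; exact List.drop_eq_getElem_cons ht
    have ha : a = g[t] := by injection hsplit
    have htl : g.drop (t + 1) = tl := by injection hsplit with _ h2; exact h2.symm
    have hga : PySem.List.pyGetD g (t : Int) ' ' = a := by
      rw [PySem.List.pyGetD_natCast, List.getD_eq_getElem _ _ ht]; exact ha.symm
    have hcast : (t : Int) + 1 = ((t + 1 : Nat) : Int) := by push_cast; ring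
    rw [PySem.List.enumerate_cons]
    simp only [List.foldl_cons]
    by_cases hg : a = PySem.List.pyGetD r (t : Int) ' '
    · have hstepG : stepG r v ((t : Int), a) = PySem.List.pySetD v (t : Int) 2 := by
        unfold stepG; rw [if_pos hg]
      rw [hstepG, hcast, ih (t + 1) _ htl (by simp [PySem.List.pySetD_natCast, hlen]) j]
      by_cases hj : j = t
      · subst hj
        rw [if_neg (by rintro ⟨h1, -, -⟩; omega)]
        rw [if_pos ⟨le_rfl, ht, by rw [hga, hg]⟩]
        exact pyGetD_set_self v j 2 0 (by omega)
      · rw [pyGetD_set_ne v t j 2 0 hj]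
        split_ifs with h1 h2 h2
        · rfl
        · exact absurd ⟨by omega, h1.2⟩ h2
        · exact absurd ⟨by omega, h2.2⟩ h1
        · rfl
    · have hstepG : stepG r v ((t : Int), a) = v := by
        unfold stepG; rw [if_neg hg]
      rw [hstepG, hcast, ih (t + 1) _ htl hlen j]
      by_cases hj : j = t
      · subst hj
        rw [if_neg (by rintro ⟨h1, -, -⟩; omega)]
        rw [if_neg (by rintro ⟨-, -, h3⟩; rw [hga] at h3; exact hg h3)]
      · split_ifs with h1 h2 h2
        · rfl
        · exact absurd ⟨by omega, h1.2⟩ h2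
        · exact absurd ⟨by omega, h2.2⟩ h1
        · rfl

theorem f2_dec (A R : Int) (hR : 0 ≤ R) (hRA : R < A) :
    A - min (max A 0) (R + 1) = (A - min (max A 0) R) - 1 := by
  rw [max_eq_left (by omega : (0:Int) ≤ A), min_eq_right (by omega : R + 1 ≤ A),
      min_eq_right (by omega : R ≤ A)]
  ring

theorem f2_same (A R : Int) (hR : 0 ≤ R) (hRA : ¬ R < A) :
    min (max A 0) (R + 1) = min (max A 0) R := by
  by_cases h0 : A ≤ 0
  · rw [max_eq_right h0, min_eq_left (by omega), min_eq_left hR]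
  · rw [max_eq_left (by omega : (0:Int) ≤ A), min_eq_left (by omega), min_eq_left (by omega)]

-- SIMULATION OF PASS 2: counts stay of shape r.map (f2 _), v evolves by stepY
theorem A2sim (g r : List Char) : ∀ (gs : List Char) (t : Nat) (v : List Int),
    g.drop t = gs →
    (∀ j : Nat, t ≤ j → (PySem.List.pyGetD v (j : Int) 0 = 2 ↔
        (j < g.length ∧ PySem.List.pyGetD g (j : Int) ' ' = PySem.List.pyGetD r (j : Int) ' '))) →
    List.foldl (stepA2 r) (v, r.map (f2 g r t)) (PySem.List.enumerate gs (t : Int))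
      = (List.foldl (stepY g r) v (PySem.List.enumerate gs (t : Int)), r.map (f2 g r (t + gs.length))) := by
  intro gs
  induction gs with
  | nil => intro t v _ _; simp [PySem.List.enumerate_nil]
  | cons a tl ih =>
    intro t v h Hv
    have ht : t < g.length := by
      have hlen2 := congrArg List.length h; simp [List.length_drop] at hlen2; omega
    have hsplit : a :: tl = g[t] :: g.drop (t + 1) := by
      rw [← h]; exact List.drop_eq_getElem_cons ht
    have htl : g.drop (t + 1) = tl := by injection hsplit with _ h2; exact h2.symm
    have hga : PySem.List.pyGetD g (t : Int) ' ' = a := by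
      rw [PySem.List.pyGetD_natCast, List.getD_eq_getElem _ _ ht]
      injection hsplit with h1 _; exact h1.symm
    have hcast : (t : Int) + 1 = ((t + 1 : Nat) : Int) := by push_cast; ring
    have hlen1 : t + (a :: tl).length = (t + 1) + tl.length := by simp; omega
    rw [PySem.List.enumerate_cons]
    simp only [List.foldl_cons]
    have hv2 := Hv t le_rfl
    have hbr : rankB g r (t : Int) a < availB g r a ↔ rankTo g r t a < availF g r a := by
      rw [bridge_rank, bridge_avail]
    by_cases hgr : a = PySem.List.pyGetD r (t : Int) ' '
    · -- green position: both sides skip, no non-green occurrence is added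
      have hveq : PySem.List.pyGetD v (t : Int) 0 = 2 := hv2.mpr ⟨ht, by rw [hga]; exact hgr⟩
      have hsA : stepA2 r (v, r.map (f2 g r t)) ((t : Int), a) = (v, r.map (f2 g r t)) := by
        unfold stepA2
        rw [if_neg (by rintro ⟨hne, -⟩; exact hne hveq)]
      have hsY : stepY g r v ((t : Int), a) = v := by
        unfold stepY
        rw [if_neg (by rintro ⟨hne, -⟩; exact hne hveq)]
      have hmap : r.map (f2 g r t) = r.map (f2 g r (t + 1)) := by
        refine List.map_congr_left fun c _ => ?_
        unfold f2
        rw [rankTo_succ]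
        have hb : (a == PySem.List.pyGetD r (t : Int) ' ') = true := by
          rw [beq_iff_eq]; exact hgr
        have hy : ypred g r c (t : Int) = false := by
          unfold ypred; rw [hga, hb]; simp
        rw [hy]
        simp only [Bool.false_eq_true, if_false, add_zero]
      rw [hsA, hsY, hmap, hcast, hlen1]
      exact ih (t + 1) v htl (fun j hj => Hv j (by omega))
    · -- non-green position
      have hvne : PySem.List.pyGetD v (t : Int) 0 ≠ 2 := by
        intro he; rcases hv2.mp he with ⟨-, heq⟩; rw [hga] at heq; exact hgr heq
      have hr2 : (a == PySem.List.pyGetD r (t : Int) ' ') = false := by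
        rw [beq_eq_false_iff_ne]; exact hgr
      have hyp : ∀ c, ypred g r c (t : Int) = (a == c) := by
        intro c; unfold ypred; rw [hga, hr2]; simp
      by_cases hRA : rankTo g r t a < availF g r a
      · -- yellow fires on both sides
        have hApos : 0 < availF g r a := lt_of_le_of_lt (rankTo_nonneg g r t a) hRA
        have hmem : a ∈ r := mem_of_availF_pos g r a hApos
        have hf2pos : 0 < f2 g r t a := by
          unfold f2
          rw [max_eq_left hApos.le, min_eq_right hRA.le]
          omega
        have hsA : stepA2 r (v, r.map (f2 g r t)) ((t : Int), a)
            = (PySem.List.pySetD v (t : Int) 1,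
               List.zipWith (fun l c => if a = l then c - 1 else c) r (r.map (f2 g r t))) := by
          unfold stepA2
          rw [if_pos ⟨hvne, hmem⟩, if_pos (by rw [idx_access r _ a hmem]; exact hf2pos)]
        have hsY : stepY g r v ((t : Int), a) = PySem.List.pySetD v (t : Int) 1 := by
          unfold stepY
          rw [if_pos ⟨hvne, hbr.mpr hRA⟩]
        have hmap : List.zipWith (fun l c => if a = l then c - 1 else c) r (r.map (f2 g r t))
            = r.map (f2 g r (t + 1)) := by
          rw [zipWith_dec_map]
          refine List.map_congr_left fun c _ => ?_
          unfold f2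
          rw [rankTo_succ, hyp c]
          by_cases hc : a = c
          · subst hc
            rw [if_pos rfl]
            simp only [beq_self_eq_true, if_true]
            exact (f2_dec (availF g r a) (rankTo g r t a) (rankTo_nonneg g r t a) hRA).symm
          · have hcb : (a == c) = false := beq_eq_false_iff_ne.mpr hc
            rw [if_neg hc, hcb]
            simp only [Bool.false_eq_true, if_false, add_zero]
        rw [hsA, hsY, hmap, hcast, hlen1]
        refine ih (t + 1) _ htl (fun j hj => ?_)
        rw [pyGetD_set_ne v t j 1 0 (by omega)]
        exact Hv j (by omega)
      · -- yellow does not fire on either side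
        have hf2le : f2 g r t a ≤ 0 := by
          unfold f2
          have hR := rankTo_nonneg g r t a
          by_cases hA0 : availF g r a ≤ 0
          · rw [max_eq_right hA0, min_eq_left hR]; omega
          · rw [max_eq_left (by omega : (0:Int) ≤ availF g r a),
                min_eq_left (by omega : availF g r a ≤ rankTo g r t a)]
            omega
        have hsA : stepA2 r (v, r.map (f2 g r t)) ((t : Int), a) = (v, r.map (f2 g r t)) := by
          unfold stepA2
          by_cases hmem : a ∈ r
          · rw [if_pos ⟨hvne, hmem⟩, if_neg (by rw [idx_access r _ a hmem]; omega)]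
          · rw [if_neg (by rintro ⟨-, hm⟩; exact hmem hm)]
        have hsY : stepY g r v ((t : Int), a) = v := by
          unfold stepY
          rw [if_neg (by rintro ⟨-, hlt⟩; exact hRA (hbr.mp hlt))]
        have hmap : r.map (f2 g r t) = r.map (f2 g r (t + 1)) := by
          refine List.map_congr_left fun c _ => ?_
          unfold f2
          rw [rankTo_succ, hyp c]
          by_cases hc : a = c
          · subst hc
            simp only [beq_self_eq_true, if_true]
            rw [f2_same (availF g r a) (rankTo g r t a) (rankTo_nonneg g r t a) hRA]
          · have hcb : (a == c) = false := beq_eq_false_iff_ne.mpr hc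
            rw [hcb]
            simp only [Bool.false_eq_true, if_false, add_zero]
        rw [hsA, hsY, hmap, hcast, hlen1]
        exact ih (t + 1) v htl (fun j hj => Hv j (by omega))

-- a write below every index of the green fold commutes with it
theorem setG_comm (r : List Char) (x : Int) : ∀ (gs : List Char) (t' tN : Nat), tN < t' →
    ∀ v, List.foldl (stepG r) (PySem.List.pySetD v (tN : Int) x) (PySem.List.enumerate gs (t' : Int))
      = PySem.List.pySetD (List.foldl (stepG r) v (PySem.List.enumerate gs (t' : Int))) (tN : Int) x := by
  intro gs
  induction gs with
  | nil => intro t' tN _ v; simp [PySem.List.enumerate_nil]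
  | cons a tl ih =>
    intro t' tN hlt v
    rw [PySem.List.enumerate_cons]
    simp only [List.foldl_cons]
    have hcast : (t' : Int) + 1 = ((t' + 1 : Nat) : Int) := by push_cast; ring
    have hcomm : stepG r (PySem.List.pySetD v (tN : Int) x) ((t' : Int), a)
        = PySem.List.pySetD (stepG r v ((t' : Int), a)) (tN : Int) x := by
      unfold stepG
      by_cases hg : a = PySem.List.pyGetD r (t' : Int) ' '
      · rw [if_pos hg, if_pos hg]
        simp only [PySem.List.pySetD_natCast]
        exact List.set_comm x 2 (show tN ≠ t' by omega)
      · rw [if_neg hg, if_neg hg]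
    rw [hcomm, hcast, ih (t' + 1) tN (by omega)]

-- FUSION: A's pass 2 after A's pass 1 is B's single pass
theorem fuse (g r : List Char) (h5 : g.length ≤ 5) : ∀ (gs : List Char) (t : Nat) (v : List Int),
    g.drop t = gs → v.length = 5 →
    (∀ j : Nat, t ≤ j → PySem.List.pyGetD v (j : Int) 0 ≠ 2) →
    List.foldl (stepY g r) (List.foldl (stepG r) v (PySem.List.enumerate gs (t : Int)))
        (PySem.List.enumerate gs (t : Int))
      = List.foldl (stepB g r) v (PySem.List.enumerate gs (t : Int)) := by
  intro gs
  induction gs with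
  | nil => intro t v _ _ _; simp [PySem.List.enumerate_nil]
  | cons a tl ih =>
    intro t v h hlen Hv0
    have ht : t < g.length := by
      have hlen2 := congrArg List.length h; simp [List.length_drop] at hlen2; omega
    have hsplit : a :: tl = g[t] :: g.drop (t + 1) := by
      rw [← h]; exact List.drop_eq_getElem_cons ht
    have htl : g.drop (t + 1) = tl := by injection hsplit with _ h2; exact h2.symm
    have hcast : (t : Int) + 1 = ((t + 1 : Nat) : Int) := by push_cast; ring
    rw [PySem.List.enumerate_cons]
    simp only [List.foldl_cons]
    rw [hcast]
    have hwlen : (stepG r v ((t : Int), a)).length = 5 := by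
      unfold stepG; split
      · rw [PySem.List.pySetD_natCast]; simp [hlen]
      · exact hlen
    have hXt := Gchar g r h5 tl (t + 1) (stepG r v ((t : Int), a)) htl hwlen t
    rw [if_neg (by rintro ⟨h1, -⟩; omega)] at hXt
    have hstepY : stepY g r
          (List.foldl (stepG r) (stepG r v ((t : Int), a)) (PySem.List.enumerate tl ((t + 1 : Nat) : Int)))
          ((t : Int), a)
        = List.foldl (stepG r) (stepY g r (stepG r v ((t : Int), a)) ((t : Int), a))
            (PySem.List.enumerate tl ((t + 1 : Nat) : Int)) := by
      unfold stepY
      rw [hXt]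
      split_ifs with hc
      · exact (setG_comm r 1 tl (t + 1) t (by omega) _).symm
      · rfl
    rw [hstepY]
    have hgetG : ∀ j : Nat, j ≠ t →
        PySem.List.pyGetD (stepG r v ((t : Int), a)) (j : Int) 0 = PySem.List.pyGetD v (j : Int) 0 := by
      intro j hj; unfold stepG; split
      · exact pyGetD_set_ne v t j 2 0 hj
      · rfl
    have hgetY : ∀ j : Nat, j ≠ t →
        PySem.List.pyGetD (stepY g r (stepG r v ((t : Int), a)) ((t : Int), a)) (j : Int) 0
          = PySem.List.pyGetD (stepG r v ((t : Int), a)) (j : Int) 0 := by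
      intro j hj; unfold stepY; split
      · exact pyGetD_set_ne _ t j 1 0 hj
      · rfl
    have hzlen : (stepY g r (stepG r v ((t : Int), a)) ((t : Int), a)).length = 5 := by
      unfold stepY; split
      · rw [PySem.List.pySetD_natCast]; simp [hwlen]
      · exact hwlen
    have hzpre : ∀ j : Nat, t + 1 ≤ j →
        PySem.List.pyGetD (stepY g r (stepG r v ((t : Int), a)) ((t : Int), a)) (j : Int) 0 ≠ 2 := by
      intro j hj
      rw [hgetY j (by omega), hgetG j (by omega)]
      exact Hv0 j (by omega)
    rw [ih (t + 1) _ htl hzlen hzpre]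
    have hfin : stepY g r (stepG r v ((t : Int), a)) ((t : Int), a) = stepB g r v ((t : Int), a) := by
      by_cases hgr : a = PySem.List.pyGetD r (t : Int) ' '
      · have hw : stepG r v ((t : Int), a) = PySem.List.pySetD v (t : Int) 2 := by
          unfold stepG; rw [if_pos hgr]
        have h2 : PySem.List.pyGetD (PySem.List.pySetD v (t : Int) 2) (t : Int) 0 = 2 :=
          pyGetD_set_self v t 2 0 (by omega)
        unfold stepY stepB
        rw [hw, if_pos hgr, if_neg (by rintro ⟨hne, -⟩; exact hne h2)]
      · have hw : stepG r v ((t : Int), a) = v := by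
          unfold stepG; rw [if_neg hgr]
        unfold stepY stepB
        rw [hw, if_neg hgr]
        have hvt : PySem.List.pyGetD v (t : Int) 0 ≠ 2 := Hv0 t le_rfl
        by_cases hc : rankB g r (t : Int) a < availB g r a
        · rw [if_pos ⟨hvt, hc⟩, if_pos hc]
        · rw [if_neg (by rintro ⟨-, hcc⟩; exact hc hcc), if_neg hc]
    rw [hfin]

theorem pyGetD_replicate5 (j : Nat) : PySem.List.pyGetD (List.replicate 5 (0 : Int)) (j : Int) 0 = 0 := by
  rw [PySem.List.pyGetD_natCast]
  rcases j with _ | _ | _ | _ | _ | j <;> simp [List.getD]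

-- ===== VERDICT (by name: the statement is the Claim_ definition above) =====
theorem calculate_vector_py_spec : Claim_equal_calculate_vector_py := by
  intro guess real_word _ hpre
  obtain ⟨h1, h5⟩ := hpre
  unfold Spec_calculate_vector_py calculate_vector_py calculate_vector_py_alt
  simp only []
  have hc0 : real_word.toList.map (fun c => ((real_word.toList.count c : Nat) : Int))
      = real_word.toList.map (f1 guess.toList real_word.toList 0) := by
    refine List.map_congr_left fun c _ => ?_
    unfold f1 greensTo
    simp
  rw [hc0]
  have hA1 := A1sim guess.toList real_word.toList guess.toList 0 (List.replicate 5 0) List.drop_zero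
  rw [Nat.cast_zero] at hA1
  rw [hA1]
  simp only [Nat.zero_add]
  have hf12 : real_word.toList.map (f1 guess.toList real_word.toList guess.toList.length)
      = real_word.toList.map (f2 guess.toList real_word.toList 0) := by
    refine List.map_congr_left fun c _ => ?_
    unfold f2 availF rankTo
    simp only [List.range_zero, List.countP_nil, Nat.cast_zero]
    rw [min_eq_right (le_max_right _ 0)]
    ring
  rw [hf12]
  have hGc := Gchar guess.toList real_word.toList h5 guess.toList 0 (List.replicate 5 0)
      List.drop_zero (by simp)
  rw [Nat.cast_zero] at hGc
  have hv1 : ∀ j : Nat, 0 ≤ j →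
      (PySem.List.pyGetD (List.foldl (stepG real_word.toList) (List.replicate 5 0)
          (PySem.List.enumerate guess.toList 0)) (j : Int) 0 = 2 ↔
        (j < guess.toList.length ∧ PySem.List.pyGetD guess.toList (j : Int) ' '
          = PySem.List.pyGetD real_word.toList (j : Int) ' ')) := by
    intro j _
    rw [hGc j]
    split_ifs with hif
    · exact iff_of_true rfl hif.2
    · rw [pyGetD_replicate5 j]
      exact iff_of_false (by omega) (fun hr' => hif ⟨Nat.zero_le j, hr'⟩)
  have hA2 := A2sim guess.toList real_word.toList guess.toList 0 _ List.drop_zero hv1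
  rw [Nat.cast_zero] at hA2
  rw [hA2]
  have hF := fuse guess.toList real_word.toList h5 guess.toList 0 (List.replicate 5 0)
      List.drop_zero (by simp) (fun j _ => by rw [pyGetD_replicate5 j]; omega)
  rw [Nat.cast_zero] at hF
  exact hF
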